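-- pv_equiv track=rewrite | github.com/studfaensen/prot-fin-dev | experiments/aa_as_chords/methods/protfin.py | score_songs
-- ===== SOURCE A (Python) =====
-- def score_songs(hashes, database):
--     matches_per_song = {}
--     for hash_, (sample_time, _) in hashes.items():
--         if hash_ in database:
--             matching_occurences = database[hash_]
--             for source_time, song_index in matching_occurences:
--                 if song_index not in matches_per_song:
--                     matches_per_song[song_index] = []
--                 matches_per_song[song_index].append((sample_time, source_time))
--
--     scores = {}
--     for song_index, matches in matches_per_song.items():
--         song_scores_by_offset = {}
--         for sample_time, source_time in matches:
--             delta = source_time - sample_time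
--             if delta not in song_scores_by_offset:
--                 song_scores_by_offset[delta] = 0
--             song_scores_by_offset[delta] += 1
--
--         max_ = (0, 0)
--         for offset, score in song_scores_by_offset.items():
--             if score > max_[1]:
--                 max_ = (offset, score)
--         scores[song_index] = max_
--
--     # Sort the scores for the user
--     scores = list(sorted(scores.items(), key=lambda x: x[1][1], reverse=True))
--
--     return scores
-- ===== SOURCE B (Python) =====
-- def score_songs(hashes, database):
--     # Flatten everything to a single list of (song, delta) match events, then
--     # answer each query by dedup + filter + count over that list: no dict
--     # accumulators, no incremental histograms.
--     events = [(song, source_time - sample_time)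
--               for hash_, (sample_time, _) in hashes.items()
--               for source_time, song in database.get(hash_, ())]
--
--     scores = []
--     for song in dict.fromkeys(s for s, _ in events):
--         deltas = [d for s, d in events if s == song]
--         best = (0, 0)
--         for delta in dict.fromkeys(deltas):
--             count = deltas.count(delta)
--             if count > best[1]:
--                 best = (delta, count)
--         scores.append((song, best))
--
--     scores.sort(key=lambda x: x[1][1], reverse=True)
--     return scores
-- ===== Notes on version B (the rewrite author's own statement) =====
-- stated objective: alternative
-- what changed: Replaces A's incrementally built dicts (per-song match lists, then per-song offset histograms) with a flat list of (song, delta) match events queried by ordered dedup + filter + list.count: per-song order and first-delta-wins ties come from first-occurrence order in the event list, then the same score-descending sort.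
import Mathlib
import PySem

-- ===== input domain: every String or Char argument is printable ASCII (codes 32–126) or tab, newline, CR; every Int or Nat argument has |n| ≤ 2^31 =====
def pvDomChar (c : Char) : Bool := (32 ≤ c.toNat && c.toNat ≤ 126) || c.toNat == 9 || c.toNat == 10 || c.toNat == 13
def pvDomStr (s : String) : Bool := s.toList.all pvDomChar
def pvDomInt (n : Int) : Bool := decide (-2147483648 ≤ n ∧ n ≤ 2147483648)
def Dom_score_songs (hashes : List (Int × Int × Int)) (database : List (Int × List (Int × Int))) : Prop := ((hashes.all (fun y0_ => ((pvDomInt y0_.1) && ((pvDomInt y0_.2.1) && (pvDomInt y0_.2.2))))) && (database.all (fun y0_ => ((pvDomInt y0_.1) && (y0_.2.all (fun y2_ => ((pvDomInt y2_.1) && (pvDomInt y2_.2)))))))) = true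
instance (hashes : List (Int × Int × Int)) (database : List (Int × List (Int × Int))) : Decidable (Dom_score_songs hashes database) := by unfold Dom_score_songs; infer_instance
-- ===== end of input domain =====

-- B flattens the matches to one list of (song, delta) events and answers each song by
-- dedup + filter + count over that list — no dict accumulators, no incremental histograms.

-- ===== PORT A =====
-- A: matches_per_song[song_index].append((sample_time, source_time)) (creating [] first)
def pvA_addMatch (m : PySem.Dict Int (List (Int × Int))) (sample : Int) (o : Int × Int) :
    PySem.Dict Int (List (Int × Int)) :=
  let m' := if m.contains o.2 then m else m.insert o.2 ([] : List (Int × Int))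
  m'.modify o.2 [] (fun l => l ++ [(sample, o.1)])

-- A's first loop over hashes.items(), with the `if hash_ in database` lookup
def pvA_phase1 (hashes : List (Int × Int × Int)) (database : List (Int × List (Int × Int))) :
    PySem.Dict Int (List (Int × Int)) :=
  hashes.foldl (fun m h =>
    match (PySem.Dict.mk database).get? h.1 with
    | none => m
    | some occ => occ.foldl (fun m o => pvA_addMatch m h.2.1 o) m) PySem.Dict.empty

-- A's song_scores_by_offset histogram for one song's match list
def pvA_offsets (ms : List (Int × Int)) : PySem.Dict Int Int :=
  ms.foldl (fun d q =>
    let delta := q.2 - q.1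
    let d' := if d.contains delta then d else d.insert delta 0
    d'.modify delta 0 (· + 1)) PySem.Dict.empty

-- A's max_ scan: first (offset, score) with score > max_[1] wins
def pvA_best (off : PySem.Dict Int Int) : Int × Int :=
  off.items.foldl (fun mx r => if r.2 > mx.2 then r else mx) ((0 : Int), (0 : Int))

def score_songs (hashes : List (Int × Int × Int)) (database : List (Int × List (Int × Int))) :
    List (Int × (Int × Int)) :=
  PySem.List.sorted
    (((pvA_phase1 hashes database).items.foldl
        (fun sc p => sc.insert p.1 (pvA_best (pvA_offsets p.2))) PySem.Dict.empty).items)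
    (fun x => x.2.2) true

-- ===== PORT B =====
-- B: the flat event list [(song, source - sample), ...] (comprehension over hashes.items())
def pvB_events (hashes : List (Int × Int × Int)) (database : List (Int × List (Int × Int))) :
    List (Int × Int) :=
  hashes.flatMap (fun h =>
    ((PySem.Dict.mk database).getD h.1 []).map (fun o => (o.2, o.1 - h.2.1)))

-- B: best (delta, count) over dict.fromkeys(deltas), count = deltas.count(delta)
def pvB_best (ds : List Int) : Int × Int :=
  (PySem.List.dedup ds).foldl (fun best d =>
    let count : Int := ds.count d
    if count > best.2 then (d, count) else best) ((0 : Int), (0 : Int))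

def score_songs_alt (hashes : List (Int × Int × Int)) (database : List (Int × List (Int × Int))) :
    List (Int × (Int × Int)) :=
  let events := pvB_events hashes database
  PySem.List.sorted
    ((PySem.List.dedup (events.map (·.1))).foldl
      (fun scores song =>
        scores ++ [(song, pvB_best ((events.filter (fun e => e.1 == song)).map (·.2)))]) [])
    (fun x => x.2.2) true

-- ===== PRECONDITION & SPEC =====
def Spec_score_songs (hashes : List (Int × Int × Int)) (database : List (Int × List (Int × Int))) (out : List (Int × (Int × Int))) : Prop := out = score_songs_alt hashes database
instance (hashes : List (Int × Int × Int)) (database : List (Int × List (Int × Int))) (out : List (Int × (Int × Int))) : Decidable (Spec_score_songs hashes database out) := by unfold Spec_score_songs; infer_instance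

-- ===== CLAIM (what is proved, stated in full; the proofs are below) =====
def Claim_equal_score_songs : Prop := ∀ (hashes : List (Int × Int × Int)) (database : List (Int × List (Int × Int))), Dom_score_songs hashes database → Spec_score_songs hashes database (score_songs hashes database)

-- ===== LEMMAS AND PROOFS =====

-- A's event stream with both times kept: (song, (sample, source))
def pvEvA (hashes : List (Int × Int × Int)) (database : List (Int × List (Int × Int))) :
    List (Int × (Int × Int)) :=
  hashes.flatMap (fun h =>
    ((PySem.Dict.mk database).getD h.1 []).map (fun o => (o.2, (h.2.1, o.1))))

-- "create-if-absent then modify" is just modify with the same default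
theorem pv_norm_modify {ν : Type} (d : PySem.Dict Int ν) (k : Int) (v : ν) (f : ν → ν) :
    (if d.contains k then d else d.insert k v).modify k v f = d.modify k v f := by
  by_cases h : d.contains k = true
  · simp [h]
  · simp only [Bool.not_eq_true] at h
    simp only [h, Bool.false_eq_true, if_false, PySem.Dict.modify]
    rw [PySem.Dict.getD_insert_self, PySem.Dict.insert_insert_self,
      PySem.Dict.getD_of_not_contains d v h]

theorem pvA_addMatch_eq (m : PySem.Dict Int (List (Int × Int))) (sample : Int) (o : Int × Int) :
    pvA_addMatch m sample o = m.modify o.2 [] (fun l => l ++ [(sample, o.1)]) := by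
  simpa [pvA_addMatch] using pv_norm_modify m o.2 [] (fun l => l ++ [(sample, o.1)])

-- A's first phase IS a modify-append fold over the flat event stream
theorem pv_phase1_eq_foldl (hashes : List (Int × Int × Int))
    (database : List (Int × List (Int × Int))) :
    pvA_phase1 hashes database =
      (pvEvA hashes database).foldl (fun m p => m.modify p.1 [] (fun l => l ++ [p.2]))
        PySem.Dict.empty := by
  unfold pvA_phase1 pvEvA
  generalize (PySem.Dict.empty : PySem.Dict Int (List (Int × Int))) = m
  induction hashes generalizing m with
  | nil => rfl
  | cons h rest ih =>
    simp only [List.foldl_cons, List.flatMap_cons, List.foldl_append]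
    cases hg : (PySem.Dict.mk database).get? h.1 with
    | none =>
      have hd : (PySem.Dict.mk database).getD h.1 ([] : List (Int × Int)) = [] := by
        rw [PySem.Dict.getD_eq_get?_getD, hg]; rfl
      rw [hd]
      simpa using ih m
    | some occ =>
      have hd : (PySem.Dict.mk database).getD h.1 ([] : List (Int × Int)) = occ := by
        rw [PySem.Dict.getD_eq_get?_getD, hg]; rfl
      rw [hd, List.foldl_map]
      have hred : (match some occ with
          | none => m
          | some occ => occ.foldl (fun m o => pvA_addMatch m h.2.1 o) m) =
          occ.foldl (fun m o => pvA_addMatch m h.2.1 o) m := rfl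
      rw [hred, PySem.List.foldl_congr_mem occ _
        (fun m o => m.modify o.2 [] (fun l => l ++ [(h.2.1, o.1)])) m
        (fun acc o _ => pvA_addMatch_eq acc h.2.1 o)]
      exact ih _

-- the histogram A builds over one song's matches is Counter(deltas)
theorem pvA_offsets_eq_counter (ms : List (Int × Int)) :
    pvA_offsets ms = PySem.Dict.counter (ms.map (fun q => q.2 - q.1)) := by
  unfold pvA_offsets
  rw [PySem.Dict.counter_eq_foldl, List.foldl_map]
  exact PySem.List.foldl_congr_mem ms _
    (fun d q => PySem.Dict.modify d (q.2 - q.1) 0 (· + 1)) PySem.Dict.empty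
    (fun d q _ => pv_norm_modify d (q.2 - q.1) 0 (· + 1))

-- A's max scan over Counter(ds).items() is B's dedup+count scan over ds
theorem pvA_best_counter (ds : List Int) :
    pvA_best (PySem.Dict.counter ds) = pvB_best ds := by
  unfold pvA_best pvB_best
  rw [PySem.Dict.items_counter, List.foldl_map, PySem.List.dedup_eq_ofList]

-- ===== VERDICT (by name: the statement is the Claim_ definition above) =====
theorem score_songs_spec : Claim_equal_score_songs := by
  intro hashes database _
  unfold Spec_score_songs score_songs score_songs_alt
  rw [pv_phase1_eq_foldl]
  set ev := pvEvA hashes database with hev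
  have hkeys : ((ev.foldl (fun m p => m.modify p.1 [] (fun l => l ++ [p.2]))
      PySem.Dict.empty).keys) = PySem.Set.ofList (ev.map (·.1)) := by
    rw [PySem.Dict.keys_foldl_modify_key ev Prod.fst]
    rfl
  have hnd : ((ev.foldl (fun m p => m.modify p.1 [] (fun l => l ++ [p.2]))
      PySem.Dict.empty).keys).Nodup := by
    apply PySem.Dict.nodup_keys_foldl_modify_key
    simp [PySem.Dict.keys_empty]
  congr 1
  rw [PySem.Dict.items_foldl_insert_fresh _ Prod.fst _ PySem.Dict.empty
    (fun _ _ => PySem.Dict.contains_empty _) (by simpa [PySem.Dict.keys] using hnd)]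
  rw [PySem.Dict.items_eq_map_keys _ hnd ([] : List (Int × Int)), hkeys]
  rw [PySem.List.foldl_append_singleton_eq_map]
  -- B's events are A's events with delta computed inline
  have hmap : pvB_events hashes database = ev.map (fun p => (p.1, p.2.2 - p.2.1)) := by
    rw [hev]
    unfold pvB_events pvEvA
    rw [List.map_flatMap]
    congr 1
    funext a
    simp [Function.comp_def, List.map_map]
  rw [hmap]
  have hsongs : (ev.map (fun p => (p.1, p.2.2 - p.2.1))).map (·.1) = ev.map (·.1) := by
    simp [List.map_map, Function.comp]
  rw [hsongs, PySem.List.dedup_eq_ofList, List.nil_append]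
  simp only [PySem.Dict.empty, List.nil_append, List.map_map]
  apply List.map_congr_left
  intro s _
  simp only [Function.comp_def]
  congr 1
  rw [PySem.Dict.getD_foldl_modify_append, pvA_offsets_eq_counter, pvA_best_counter]
  congr 1
  rw [List.filter_map]
  simp [List.map_map, Function.comp_def]
  rfl
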